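-- pv_equiv track=rewrite | github.com/momolaikankan/tsy1 | struc/huowujiazhi.py | func
-- ===== SOURCE A (Python) =====
-- def func(str1, lis, path, index):
--     if index == len(str1):
--         lis.append(path)
--         return
--     yes = path+str1[index]
--     func(str1, lis, yes, index+1)
--     no = path
--     func(str1, lis, no, index+1)
--     return lis
-- ===== SOURCE B (Python) =====
-- def func(str1, lis, path, index):
--     # Iterative re-implementation: explicit stack instead of recursion.
--     # Mutates lis in place exactly like A (equivalence is about the return value and mutation order).
--     if index == len(str1):
--         lis.append(path)
--         return
--     stack = [(path, index)]
--     while stack: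
--         p, i = stack.pop()
--         if i == len(str1):
--             lis.append(p)
--         else:
--             stack.append((p, i + 1))          # exclude branch, expanded second
--             stack.append((p + str1[i], i + 1))  # include branch, expanded first (pre-order)
--     return lis
-- ===== Notes on version B (the rewrite author's own statement) =====
-- stated objective: alternative
-- what changed: A's double self-recursion (include branch then exclude branch) is replaced by a single while-loop over an explicit stack of (path, index) frames, pushed exclude-then-include so popping reproduces A's pre-order exactly.
-- outside the precondition, e.g. on func('ab', [], '', 2): A returns None, B returns None
import Mathlib
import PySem

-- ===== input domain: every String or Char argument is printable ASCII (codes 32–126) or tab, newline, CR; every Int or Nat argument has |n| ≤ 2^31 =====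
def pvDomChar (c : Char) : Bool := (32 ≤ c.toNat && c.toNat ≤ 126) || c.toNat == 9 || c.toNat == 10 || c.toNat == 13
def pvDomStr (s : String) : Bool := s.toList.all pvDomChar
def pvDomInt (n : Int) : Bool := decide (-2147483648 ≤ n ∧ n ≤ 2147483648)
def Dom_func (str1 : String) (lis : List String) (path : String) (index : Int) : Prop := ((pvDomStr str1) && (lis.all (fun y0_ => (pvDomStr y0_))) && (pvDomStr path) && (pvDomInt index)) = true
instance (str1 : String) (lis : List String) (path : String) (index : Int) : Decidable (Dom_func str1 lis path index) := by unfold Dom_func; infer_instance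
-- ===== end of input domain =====

-- B replaces A's double recursion by a single explicit-stack loop (pre-order, include branch first);
-- same cost, different decomposition ('alternative'); equivalence is about the returned list (both
-- Pythons also mutate `lis` in place in the same way).

-- Needed by the ports' termination proofs (cited in decreasing_by), so it stays above them.
theorem pv_pyGet?_some_range {s : String} {i : Int} {c : Char}
    (h : PySem.Str.pyGet? s i = some c) : -(s.length : Int) ≤ i ∧ i < (s.length : Int) := by
  have h' : PySem.List.pyGet? s.toList i = some c := by simpa using h
  have hin : PySem.Raise.InRange s.toList.length i := by
    by_contra hc
    rw [← PySem.List.pyGet?_eq_none_iff] at hc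
    simp [hc] at h'
  simpa [PySem.Raise.InRange] using hin

-- ===== PORT A =====
-- literal transliteration of A's recursion; the mutated `lis` is threaded as the list state.
-- (Python returns None when index == len(str1) and raises IndexError out of range — both outside Pre_;
-- the port returns the mutated-list state / `lis` there.)
def func (str1 : String) (lis : List String) (path : String) (index : Int) : List String :=
  if index = (str1.length : Int) then lis ++ [path]
  else
    match h : PySem.Str.pyGet? str1 index with
    | none => lis
    | some c =>
      let yes := path.push c
      let lis1 := func str1 lis yes (index + 1)
      func str1 lis1 path (index + 1)
termination_by ((str1.length : Int) - index).toNat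
decreasing_by
  all_goals
    have := pv_pyGet?_some_range h
    omega

-- ===== PORT B =====
-- measure of B's stack: each pending frame (p, i) weighs 3^(len - i).
def pvMeasure (n : Nat) (st : List (String × Int)) : Nat :=
  (st.map (fun pi => 3 ^ (((n : Int) - pi.2).toNat))).sum

-- B's `while stack:` loop; head of the list = top of the stack.
def loopB (str1 : String) (stack : List (String × Int)) (lis : List String) : List String :=
  match stack with
  | [] => lis
  | (p, i) :: rest =>
    if i = (str1.length : Int) then loopB str1 rest (lis ++ [p])
    else
      match h : PySem.Str.pyGet? str1 i with
      | none => loopB str1 rest lis   -- Python raises IndexError here (outside Pre_)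
      | some c => loopB str1 ((p.push c, i + 1) :: (p, i + 1) :: rest) lis
termination_by pvMeasure str1.length stack
decreasing_by
  · have : 0 < 3 ^ (((str1.length : Int) - i).toNat) := pow_pos (by norm_num : (0:ℕ) < 3) _
    simp [pvMeasure]
  · have : 0 < 3 ^ (((str1.length : Int) - i).toNat) := pow_pos (by norm_num : (0:ℕ) < 3) _
    simp [pvMeasure]
  · have hr := pv_pyGet?_some_range h
    have hk : (((str1.length : Int) - (i + 1)).toNat) + 1 = ((str1.length : Int) - i).toNat := by omega
    simp only [pvMeasure, List.map_cons, List.sum_cons]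
    have h3 : 3 ^ (((str1.length : Int) - (i + 1)).toNat)
        + 3 ^ (((str1.length : Int) - (i + 1)).toNat) < 3 ^ (((str1.length : Int) - i).toNat) := by
      rw [← hk, pow_succ]
      have : 0 < 3 ^ (((str1.length : Int) - (i + 1)).toNat) := pow_pos (by norm_num : (0:ℕ) < 3) _
      omega
    omega

def func_alt (str1 : String) (lis : List String) (path : String) (index : Int) : List String :=
  if index = (str1.length : Int) then lis ++ [path]
  else loopB str1 [(path, index)] lis

-- ===== PRECONDITION & SPEC =====
-- Pre_ excludes index == len(str1), where A (and B) return None rather than a list, and indices out of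
-- range, where both Pythons raise IndexError; negative in-range indices (Python wraparound) stay inside.
def Pre_func (str1 : String) (lis : List String) (path : String) (index : Int) : Prop :=
  -(str1.length : Int) ≤ index ∧ index < (str1.length : Int)
instance (str1 : String) (lis : List String) (path : String) (index : Int) : Decidable (Pre_func str1 lis path index) := by unfold Pre_func; infer_instance

def pvWitness_func : String × List String × String × Int := ("ab", [], "", 0)

def Spec_func (str1 : String) (lis : List String) (path : String) (index : Int) (out : List String) : Prop := out = func_alt str1 lis path index
instance (str1 : String) (lis : List String) (path : String) (index : Int) (out : List String) : Decidable (Spec_func str1 lis path index out) := by unfold Spec_func; infer_instance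

-- ===== CLAIM (what is proved, stated in full; the proofs are below) =====
def Claim_equal_func : Prop := ∀ (str1 : String) (lis : List String) (path : String) (index : Int), Dom_func str1 lis path index → Pre_func str1 lis path index → Spec_func str1 lis path index (func str1 lis path index)

-- ===== LEMMAS AND PROOFS =====

-- expanding the top stack frame fully is exactly one call of A's recursion on the list state
theorem loopB_cons (str1 : String) (k : Nat) :
    ∀ (i : Int), ((str1.length : Int) - i).toNat ≤ k →
    ∀ (p : String) (rest : List (String × Int)) (lis : List String),
      loopB str1 ((p, i) :: rest) lis = loopB str1 rest (func str1 lis p i) := by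
  induction k with
  | zero =>
    intro i hi p rest lis
    rw [loopB, func]
    by_cases he : i = (str1.length : Int)
    · simp [he]
    · have hnone : PySem.Str.pyGet? str1 i = none := by
        cases hg : PySem.Str.pyGet? str1 i with
        | none => rfl
        | some c => exact absurd (pv_pyGet?_some_range hg).2 (by omega)
      simp only [if_neg he]
      split
      · rfl
      · simp_all
  | succ k ih =>
    intro i hi p rest lis
    rw [loopB, func]
    by_cases he : i = (str1.length : Int)
    · simp [he]
    · simp only [if_neg he]
      split
      · rfl
      · rename_i c1 h1
        have hr := pv_pyGet?_some_range (show PySem.Str.pyGet? str1 i = some c1 from h1)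
        have hle : ((str1.length : Int) - (i + 1)).toNat ≤ k := by omega
        rw [ih (i + 1) hle, ih (i + 1) hle]

theorem func_eq_alt (str1 : String) (lis : List String) (path : String) (index : Int) :
    func str1 lis path index = func_alt str1 lis path index := by
  unfold func_alt
  by_cases he : index = (str1.length : Int)
  · rw [func]; simp [he]
  · rw [loopB_cons str1 (((str1.length : Int) - index).toNat) index le_rfl, loopB]
    simp [he]

-- ===== VERDICT (by name: the statement is the Claim_ definition above) =====
theorem func_spec : Claim_equal_func := by
  intro str1 lis path index _ _
  unfold Spec_func
  exact func_eq_alt str1 lis path index
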